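-- pv_equiv track=rewrite | github.com/stelong/Historia | utilities/scan_logfile.py | ph_counter
-- ===== SOURCE A (Python) =====
-- def ph_counter(phase):
-- 	n = len(phase)
--
-- 	cp = [0, 0, 0, 0]
-- 	for i in range(4):
-- 		j = 0
-- 		while j < n - 1:
-- 			if phase[j] == i + 1:
-- 				cp[i] = cp[i] + 1
-- 				j = j + 1
-- 				while phase[j] == i + 1 and j < n - 1:
-- 					j = j + 1
-- 			else:
-- 				j = j + 1
--
-- 	return cp
-- ===== SOURCE B (Python) =====
-- def ph_counter(phase):
--     n = len(phase)
--     cp = [0, 0, 0, 0]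
--     for j in range(n - 1):
--         v = phase[j]
--         if 1 <= v <= 4 and (j == 0 or phase[j - 1] != v):
--             cp[v - 1] += 1
--     return cp
-- ===== Notes on version B (the rewrite author's own statement) =====
-- stated objective: simpler
-- what changed: Replaces four separate while-loop scans (one per phase value, with an inner run-skipping loop) by a single pass over indices 0..n-2 that increments cp[v-1] exactly at each run start (phase[j-1] != phase[j]).
import Mathlib
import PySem

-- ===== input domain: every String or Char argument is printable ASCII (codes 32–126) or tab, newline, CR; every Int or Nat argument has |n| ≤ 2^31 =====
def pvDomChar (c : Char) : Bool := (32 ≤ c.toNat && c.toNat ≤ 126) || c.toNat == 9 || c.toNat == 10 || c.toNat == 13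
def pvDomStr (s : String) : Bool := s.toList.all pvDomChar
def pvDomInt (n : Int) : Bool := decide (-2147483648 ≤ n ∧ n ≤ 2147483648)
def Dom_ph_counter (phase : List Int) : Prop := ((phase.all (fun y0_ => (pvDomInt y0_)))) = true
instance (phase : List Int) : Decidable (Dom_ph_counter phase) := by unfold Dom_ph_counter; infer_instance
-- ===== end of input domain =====

-- B replaces A's four separate while-loop scans by one pass that counts each run at its start (simpler, one sweep).

-- shared indexing helper: Python's phase[j] for an in-range nonnegative j
def pvGet (xs : List Int) (j : Nat) : Int := (PySem.List.pyGet? xs (j : Int)).getD 0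

-- ===== PORT A =====
-- inner 'while phase[j] == i+1 and j < n-1: j += 1' of A, returning the final j
def phInner (phase : List Int) (v : Int) (j : Nat) : Nat :=
  if h : pvGet phase j = v ∧ j < phase.length - 1 then phInner phase v (j + 1) else j
termination_by phase.length - j
decreasing_by omega

-- termination fact the outer loop's recursion needs
theorem phInner_ge (phase : List Int) (v : Int) (j : Nat) : j ≤ phInner phase v j := by
  fun_induction phInner phase v j with
  | case1 j h ih => omega
  | case2 j h => omega

-- outer 'while j < n-1' of A for one value v = i+1, accumulating cp[i] in c
def phOuter (phase : List Int) (v : Int) (j : Nat) (c : Int) : Int :=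
  if h : j < phase.length - 1 then
    if pvGet phase j = v then phOuter phase v (phInner phase v (j + 1)) (c + 1)
    else phOuter phase v (j + 1) c
  else c
termination_by phase.length - j
decreasing_by
  · have := phInner_ge phase v (j + 1); omega
  · omega

def ph_counter (phase : List Int) : List Int :=
  (List.range 4).map (fun i => phOuter phase ((i : Int) + 1) 0 0)

-- ===== PORT B =====
-- one iteration of B's loop body: bump cp[v-1] when j starts a run of v ∈ {1,2,3,4}
def pvStep (phase : List Int) (cp : List Int) (j : Nat) : List Int :=
  let v := pvGet phase j
  if 1 ≤ v ∧ v ≤ 4 ∧ (j = 0 ∨ pvGet phase (j - 1) ≠ v) then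
    cp.set (v - 1).toNat (cp.getD (v - 1).toNat 0 + 1)
  else cp

def ph_counter_alt (phase : List Int) : List Int :=
  (List.range (phase.length - 1)).foldl (pvStep phase) [0, 0, 0, 0]

-- ===== PRECONDITION & SPEC =====
def Spec_ph_counter (phase : List Int) (out : List Int) : Prop := out = ph_counter_alt phase
instance (phase : List Int) (out : List Int) : Decidable (Spec_ph_counter phase out) := by unfold Spec_ph_counter; infer_instance

-- ===== CLAIM (what is proved, stated in full; the proofs are below) =====
def Claim_equal_ph_counter : Prop := ∀ (phase : List Int), Dom_ph_counter phase → Spec_ph_counter phase (ph_counter phase)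

-- ===== LEMMAS AND PROOFS =====

-- j is the start of a run of value v (within the first n-1 positions these are exactly what both programs count)
abbrev pvStart (phase : List Int) (v : Int) (j : Nat) : Prop :=
  pvGet phase j = v ∧ (j = 0 ∨ pvGet phase (j - 1) ≠ v)

-- number of run starts of v among indices [j, n-1)
def pvCnt (phase : List Int) (v : Int) (j : Nat) : Int :=
  ((List.range' j (phase.length - 1 - j)).countP (fun k => decide (pvStart phase v k)) : Nat)

theorem pvCnt_base (phase : List Int) (v : Int) (j : Nat) (h : ¬ j < phase.length - 1) :
    pvCnt phase v j = 0 := by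
  unfold pvCnt
  have : phase.length - 1 - j = 0 := by omega
  simp [this]

theorem pvCnt_step (phase : List Int) (v : Int) (j : Nat) (h : j < phase.length - 1) :
    pvCnt phase v j = (if pvStart phase v j then 1 else 0) + pvCnt phase v (j + 1) := by
  unfold pvCnt
  have h1 : phase.length - 1 - j = (phase.length - 1 - (j + 1)) + 1 := by omega
  rw [h1, List.range'_succ, List.countP_cons]
  by_cases hs : pvStart phase v j
  · simp [hs]; omega
  · simp [hs]

theorem pvCnt_skip (phase : List Int) (v : Int) :
    ∀ (d j : Nat), j + d ≤ phase.length - 1 →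
      (∀ k, j ≤ k → k < j + d → ¬ pvStart phase v k) →
      pvCnt phase v j = pvCnt phase v (j + d) := by
  intro d
  induction d with
  | zero => intro j _ _; rfl
  | succ d ih =>
      intro j hle hns
      have hj : j < phase.length - 1 := by omega
      rw [pvCnt_step phase v j hj, if_neg (hns j le_rfl (by omega))]
      have := ih (j + 1) (by omega) (fun k hk1 hk2 => hns k (by omega) (by omega))
      rw [Int.zero_add, this]
      congr 1
      omega

-- characterisation of A's inner while loop
theorem phInner_spec (phase : List Int) (v : Int) :
    ∀ (j : Nat), j ≤ phase.length - 1 →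
      j ≤ phInner phase v j ∧ phInner phase v j ≤ phase.length - 1 ∧
      (∀ k, j ≤ k → k < phInner phase v j → pvGet phase k = v) ∧
      (pvGet phase (phInner phase v j) ≠ v ∨ phInner phase v j = phase.length - 1) := by
  intro j hj
  fun_induction phInner phase v j with
  | case1 j h ih =>
      have hrec := ih (by omega)
      refine ⟨by omega, hrec.2.1, ?_, hrec.2.2.2⟩
      intro k hk1 hk2
      rcases Nat.eq_or_lt_of_le hk1 with rfl | hk
      · exact h.1
      · exact hrec.2.2.1 k (by omega) hk2
  | case2 j h =>
      refine ⟨le_rfl, hj, fun k hk1 hk2 => absurd hk2 (by omega), ?_⟩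
      by_cases hv : pvGet phase j = v
      · right; omega
      · left; exact hv

-- A's outer loop counts exactly the run starts in [j, n-1)
theorem phOuter_eq (phase : List Int) (v : Int) :
    ∀ (m j : Nat) (c : Int), phase.length - 1 - j ≤ m →
      (j = 0 ∨ pvGet phase (j - 1) ≠ v ∨ pvGet phase j ≠ v) →
      phOuter phase v j c = c + pvCnt phase v j := by
  intro m
  induction m with
  | zero =>
      intro j c hm _
      have hj : ¬ j < phase.length - 1 := by omega
      unfold phOuter; rw [dif_neg hj, pvCnt_base phase v j hj]; omega
  | succ m ih =>
      intro j c hm hfresh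
      by_cases hj : j < phase.length - 1
      · unfold phOuter
        rw [dif_pos hj]
        by_cases hv : pvGet phase j = v
        · rw [if_pos hv]
          have hstart : pvStart phase v j := by
            refine ⟨hv, ?_⟩
            rcases hfresh with h0 | hprev | hcontra
            · exact Or.inl h0
            · exact Or.inr hprev
            · exact absurd hv hcontra
          set j' := phInner phase v (j + 1) with hj'def
          have hspec := phInner_spec phase v (j + 1) (by omega)
          have hskip : pvCnt phase v (j + 1) = pvCnt phase v j' := by
            have h1 := pvCnt_skip phase v (j' - (j + 1)) (j + 1) (by omega) ?_
            · rw [h1]; congr 1; omega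
            · intro k hk1 hk2 hstart'
              have hkv : pvGet phase (k - 1) = v := by
                rcases Nat.eq_or_lt_of_le hk1 with h | h
                · simp [← h, hv]
                · exact hspec.2.2.1 (k - 1) (by omega) (by omega)
              rcases hstart'.2 with h0 | hne
              · omega
              · exact hne hkv
          rw [pvCnt_step phase v j hj, if_pos hstart]
          by_cases hj'lt : j' < phase.length - 1
          · have hj'v : pvGet phase j' ≠ v := by
              rcases hspec.2.2.2 with h | h
              · exact h
              · omega
            rw [ih j' (c + 1) (by have := hspec.1; omega) (Or.inr (Or.inr hj'v))]
            rw [hskip]; ring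
          · unfold phOuter
            rw [dif_neg hj'lt, pvCnt_base phase v j' hj'lt] at *
            rw [hskip]; ring
        · rw [if_neg hv]
          rw [ih (j + 1) c (by omega) (by right; left; simpa using hv)]
          rw [pvCnt_step phase v j hj, if_neg (fun hs => hv hs.1)]
          ring
      · unfold phOuter; rw [dif_neg hj, pvCnt_base phase v j hj]; omega

-- B's fold invariant
theorem alt_fold (phase : List Int) :
    ∀ (L : List Nat) (a b c d : Int),
      L.foldl (pvStep phase) [a, b, c, d]
      = [a + (L.countP (fun k => decide (pvStart phase 1 k)) : Nat),
         b + (L.countP (fun k => decide (pvStart phase 2 k)) : Nat),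
         c + (L.countP (fun k => decide (pvStart phase 3 k)) : Nat),
         d + (L.countP (fun k => decide (pvStart phase 4 k)) : Nat)] := by
  intro L
  induction L with
  | nil => intro a b c d; simp
  | cons j L ih =>
      intro a b c d
      simp only [List.foldl_cons, List.countP_cons]
      by_cases hcond : 1 ≤ pvGet phase j ∧ pvGet phase j ≤ 4 ∧ (j = 0 ∨ pvGet phase (j - 1) ≠ pvGet phase j)
      · have hstep : pvStep phase [a, b, c, d] j
            = List.set [a, b, c, d] (pvGet phase j - 1).toNat
                (List.getD [a, b, c, d] (pvGet phase j - 1).toNat 0 + 1) := by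
          simp only [pvStep]; rw [if_pos hcond]
        obtain ⟨h1, h4, hpre⟩ := hcond
        rw [hstep]
        have hv4 : pvGet phase j = 1 ∨ pvGet phase j = 2 ∨ pvGet phase j = 3 ∨ pvGet phase j = 4 := by
          omega
        have hyes : ∀ w : Int, pvGet phase j = w → pvStart phase w j :=
          fun w hw => ⟨hw, by rw [← hw]; exact hpre⟩
        have hno : ∀ w : Int, pvGet phase j ≠ w → ¬ pvStart phase w j :=
          fun w hw hs => hw hs.1
        rcases hv4 with hv | hv | hv | hv <;>
          [ (have s1 := hyes 1 hv;
             have s2 := hno 2 (by rw [hv]; decide);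
             have s3 := hno 3 (by rw [hv]; decide);
             have s4 := hno 4 (by rw [hv]; decide));
            (have s2 := hyes 2 hv;
             have s1 := hno 1 (by rw [hv]; decide);
             have s3 := hno 3 (by rw [hv]; decide);
             have s4 := hno 4 (by rw [hv]; decide));
            (have s3 := hyes 3 hv;
             have s1 := hno 1 (by rw [hv]; decide);
             have s2 := hno 2 (by rw [hv]; decide);
             have s4 := hno 4 (by rw [hv]; decide));
            (have s4 := hyes 4 hv;
             have s1 := hno 1 (by rw [hv]; decide);
             have s2 := hno 2 (by rw [hv]; decide);
             have s3 := hno 3 (by rw [hv]; decide)) ] <;>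
          simp only [hv] <;>
          simp only [show ((1:Int) - 1).toNat = 0 from rfl, show ((2:Int) - 1).toNat = 1 from rfl,
            show ((3:Int) - 1).toNat = 2 from rfl, show ((4:Int) - 1).toNat = 3 from rfl,
            List.getD_cons_zero, List.getD_cons_succ, List.set_cons_zero, List.set_cons_succ] <;>
          rw [ih] <;>
          simp [s1, s2, s3, s4] <;>
          omega
      · have hstep : pvStep phase [a, b, c, d] j = [a, b, c, d] := by
          simp only [pvStep]; rw [if_neg hcond]
        have hno : ∀ w : Int, 1 ≤ w → w ≤ 4 → ¬ pvStart phase w j := by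
          intro w hw1 hw4 hs
          exact hcond ⟨by rw [hs.1]; omega, by rw [hs.1]; omega, by rw [hs.1]; exact hs.2⟩
        rw [hstep, ih]
        simp [hno 1 (by norm_num) (by norm_num), hno 2 (by norm_num) (by norm_num),
          hno 3 (by norm_num) (by norm_num), hno 4 (by norm_num) (by norm_num)]

theorem ph_counter_alt_eq (phase : List Int) :
    ph_counter_alt phase = [pvCnt phase 1 0, pvCnt phase 2 0, pvCnt phase 3 0, pvCnt phase 4 0] := by
  unfold ph_counter_alt pvCnt
  rw [List.range_eq_range', alt_fold]
  norm_num

-- ===== VERDICT (by name: the statement is the Claim_ definition above) =====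
theorem ph_counter_spec : Claim_equal_ph_counter := by
  intro phase _
  unfold Spec_ph_counter
  rw [ph_counter_alt_eq]
  unfold ph_counter
  simp only [List.range_succ, List.range_zero, List.nil_append, List.cons_append]
  norm_num
  refine ⟨?_, ?_, ?_, ?_⟩ <;>
    · rw [phOuter_eq phase _ phase.length 0 0 (by omega) (Or.inl rfl)]; ring
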